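-- pv_equiv track=rewrite | github.com/strenuousnerd8/Code | TwoCommonOfThree.py | get
-- ===== SOURCE A (Python) =====
-- def get(a, b, c):
--     overall = a + b + c
--     overall = set(overall)
--     res = []
--     for i in overall:
--         if(
--             a.count(i) and b.count(i) or b.count(i) and c.count(i) or c.count(i) and a.count(i)
--             ):
--             res.append(i)
--     return max(res)
-- ===== SOURCE B (Python) =====
-- def get(a, b, c):
--     # count, for each distinct value, in how many of the three lists it occurs
--     cnt = {}
--     for x in list(set(a)) + list(set(b)) + list(set(c)):
--         cnt[x] = cnt.get(x, 0) + 1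
--     return max(x for x, k in cnt.items() if k >= 2)
-- ===== Notes on version B (the rewrite author's own statement) =====
-- stated objective: faster
-- what changed: Replaces A's per-element three-way pairwise count-OR branch with a frequency table counting in how many lists each distinct value occurs, then takes the max over values with count >= 2.
import Mathlib
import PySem

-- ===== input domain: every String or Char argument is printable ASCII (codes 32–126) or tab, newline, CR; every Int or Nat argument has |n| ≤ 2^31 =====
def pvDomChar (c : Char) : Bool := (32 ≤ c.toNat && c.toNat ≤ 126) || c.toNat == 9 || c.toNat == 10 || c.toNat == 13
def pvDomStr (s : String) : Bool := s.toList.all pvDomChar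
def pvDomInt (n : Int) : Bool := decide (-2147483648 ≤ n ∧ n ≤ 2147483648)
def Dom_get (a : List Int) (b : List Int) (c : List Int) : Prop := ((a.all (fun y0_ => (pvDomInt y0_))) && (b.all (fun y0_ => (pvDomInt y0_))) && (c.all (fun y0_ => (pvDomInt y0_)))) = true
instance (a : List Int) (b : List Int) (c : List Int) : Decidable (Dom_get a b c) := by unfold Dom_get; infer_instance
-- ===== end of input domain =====

-- B replaces A's per-element three-way pairwise membership test by a count-across-lists
-- frequency table with a >= 2 threshold (simpler one-pass decomposition).

-- ===== PORT A =====
def get (a : List Int) (b : List Int) (c : List Int) : Int :=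
  let overall := PySem.Set.ofList (a ++ b ++ c)
  let res := overall.foldl (fun r i =>
    if (PySem.List.count a i ≠ 0 ∧ PySem.List.count b i ≠ 0) ∨
       (PySem.List.count b i ≠ 0 ∧ PySem.List.count c i ≠ 0) ∨
       (PySem.List.count c i ≠ 0 ∧ PySem.List.count a i ≠ 0)
    then r ++ [i] else r) []
  -- max(res); ValueError on empty res is excluded by Pre_get, 0 is unreachable there
  (PySem.List.max? res (fun x => x)).getD 0

-- ===== PORT B =====
def get_alt (a : List Int) (b : List Int) (c : List Int) : Int :=
  let xs := PySem.Set.ofList a ++ PySem.Set.ofList b ++ PySem.Set.ofList c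
  let cnt := xs.foldl (fun d x => d.insert x (d.getD x 0 + 1)) (PySem.Dict.empty : PySem.Dict Int Int)
  let cands := (cnt.items.filter (fun p => 2 ≤ p.2)).map Prod.fst
  -- max(...); ValueError on empty is excluded by Pre_get, 0 is unreachable there
  (PySem.List.max? cands (fun x => x)).getD 0

-- ===== PRECONDITION & SPEC =====
-- Pre_get excludes exactly the inputs where no value occurs in at least two of the
-- three lists: there A's max([]) raises ValueError (and so does B's max).
def Pre_get (a : List Int) (b : List Int) (c : List Int) : Prop :=
  (∃ x ∈ a, x ∈ b ∨ x ∈ c) ∨ (∃ x ∈ b, x ∈ c)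
instance (a : List Int) (b : List Int) (c : List Int) : Decidable (Pre_get a b c) := by
  unfold Pre_get; infer_instance
def pvWitness_get : List Int × List Int × List Int := ([1, 3], [3, 2], [2])

def Spec_get (a : List Int) (b : List Int) (c : List Int) (out : Int) : Prop := out = get_alt a b c
instance (a : List Int) (b : List Int) (c : List Int) (out : Int) : Decidable (Spec_get a b c out) := by unfold Spec_get; infer_instance

-- ===== CLAIM (what is proved, stated in full; the proofs are below) =====
def Claim_equal_get : Prop := ∀ (a : List Int) (b : List Int) (c : List Int), Dom_get a b c → Pre_get a b c → Spec_get a b c (get a b c)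

-- ===== LEMMAS AND PROOFS =====

-- the shared predicate: x occurs in at least two of the three lists
def inTwo (a b c : List Int) (x : Int) : Prop :=
  (x ∈ a ∧ x ∈ b) ∨ (x ∈ b ∧ x ∈ c) ∨ (x ∈ c ∧ x ∈ a)

lemma count_ne_zero {x : Int} {l : List Int} : PySem.List.count l x ≠ 0 ↔ x ∈ l := by
  simp [PySem.List.count, List.count_eq_zero]

lemma foldl_append_ite {P : Int → Prop} [DecidablePred P] (l acc : List Int) (x : Int) :
    (x ∈ l.foldl (fun r i => if P i then r ++ [i] else r) acc) ↔ x ∈ acc ∨ (x ∈ l ∧ P x) := by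
  induction l generalizing acc with
  | nil => simp
  | cons h t ih =>
    simp only [List.foldl_cons]
    by_cases hP : P h
    · rw [if_pos hP, ih]
      have hP' : x = h → P x := fun e => e ▸ hP
      simp only [List.mem_append, List.mem_cons, List.not_mem_nil, or_false]
      tauto
    · rw [if_neg hP, ih]
      have hP' : x = h → ¬ P x := fun e => e ▸ hP
      simp only [List.mem_cons]
      tauto

lemma mem_resA (a b c : List Int) (x : Int) :
    (x ∈ (PySem.Set.ofList (a ++ b ++ c)).foldl (fun r i =>
      if (PySem.List.count a i ≠ 0 ∧ PySem.List.count b i ≠ 0) ∨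
         (PySem.List.count b i ≠ 0 ∧ PySem.List.count c i ≠ 0) ∨
         (PySem.List.count c i ≠ 0 ∧ PySem.List.count a i ≠ 0)
      then r ++ [i] else r) []) ↔ inTwo a b c x := by
  rw [foldl_append_ite]
  simp only [List.not_mem_nil, false_or, PySem.Set.mem_ofList, List.mem_append,
    inTwo, count_ne_zero]
  constructor
  · rintro ⟨-, h⟩; exact h
  · intro h
    refine ⟨?_, h⟩
    rcases h with ⟨h1, _⟩ | ⟨h1, _⟩ | ⟨h1, _⟩ <;> simp [h1]

lemma count_set_list (l : List Int) (x : Int) :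
    (PySem.Set.ofList l).count x = if x ∈ l then 1 else 0 := by
  have hn := PySem.Set.nodup_ofList l
  by_cases h : x ∈ l
  · simp [h]
  · simp [h, List.count_eq_zero_of_not_mem (fun hx => h ((PySem.Set.mem_ofList l x).1 hx))]

lemma mem_candsB (a b c : List Int) (x : Int) :
    (x ∈ (((PySem.Dict.counter (PySem.Set.ofList a ++ PySem.Set.ofList b ++ PySem.Set.ofList c)).items.filter
        (fun p => 2 ≤ p.2)).map Prod.fst)) ↔ inTwo a b c x := by
  rw [PySem.Dict.items_counter, List.filter_map, List.map_map]
  simp only [Function.comp_def, List.mem_map, List.mem_filter, PySem.Set.mem_ofList,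
    List.mem_append, decide_eq_true_eq, List.count_append, count_set_list, inTwo]
  constructor
  · rintro ⟨y, ⟨⟨hy, h2⟩, rfl⟩⟩
    by_cases ha : y ∈ a <;> by_cases hb : y ∈ b <;> by_cases hc : y ∈ c <;>
      simp only [ha, hb, hc, if_true, if_false] at h2 hy ⊢ <;> simp_all
  · intro h
    refine ⟨x, ⟨⟨?_, ?_⟩, rfl⟩⟩
    · rcases h with ⟨h1, _⟩ | ⟨h1, _⟩ | ⟨h1, _⟩ <;> simp [h1]
    · rcases h with ⟨h1, h2⟩ | ⟨h1, h2⟩ | ⟨h1, h2⟩ <;> simp [h1, h2] <;> split_ifs <;> push_cast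

lemma max_congr_mem (xs ys : List Int) (h : ∀ x, x ∈ xs ↔ x ∈ ys) :
    (PySem.List.max? xs (fun x => x)).getD 0 = (PySem.List.max? ys (fun x => x)).getD 0 := by
  rcases hx : PySem.List.max? xs (fun x => x) with _ | m
  · have hxs : xs = [] := (PySem.List.max?_eq_none_iff xs _).1 hx
    have hys : ys = [] := List.eq_nil_iff_forall_not_mem.2
      (fun x hxmem => by subst hxs; exact absurd ((h x).2 hxmem) (List.not_mem_nil))
    rw [hys, (PySem.List.max?_eq_none_iff [] _).2 rfl]
  · have hym : m ∈ ys := (h m).1 (PySem.List.max?_mem hx)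
    rcases hy : PySem.List.max? ys (fun x => x) with _ | n
    · exact absurd ((PySem.List.max?_eq_none_iff ys _).1 hy ▸ hym) (List.not_mem_nil)
    · have h1 : m ≤ n := PySem.List.max?_isMax hy m hym
      have h2 : n ≤ m := PySem.List.max?_isMax hx n ((h n).2 (PySem.List.max?_mem hy))
      simp [le_antisymm h1 h2]

-- ===== VERDICT (by name: the statement is the Claim_ definition above) =====
theorem get_spec : Claim_equal_get := by
  intro a b c _ _
  unfold Spec_get _root_.get get_alt
  exact max_congr_mem _ _ (fun x => (mem_resA a b c x).trans (mem_candsB a b c x).symm)
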